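-- pv_equiv track=rewrite | github.com/AlgoMathITMO/public-transport-network | ptn/osm.py | is_restaurant
-- ===== SOURCE A (Python) =====
-- from typing import List, Tuple
--
-- def is_any_pair_present(tags: dict, items: List[Tuple[str, str]]) -> bool:
--     return isinstance(tags, dict) \
--            and any((key, value) in items for key, value in tags.items())
--
-- def is_restaurant(tags: dict) -> bool:
--     items = [
--         ('shop', 'pastry'),
--         ('shop', 'bakery'),
--     ]
--
--     items += [('amenity', val) for val in ['restaurant', 'cafe', 'fast_food', 'bakery',
--                                            'bar', 'nightclub', 'internet_cafe', 'pub']]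
--
--     return is_any_pair_present(tags, items)
-- ===== SOURCE B (Python) =====
-- def is_restaurant(tags: dict) -> bool:
--     if not isinstance(tags, dict):
--         return False
--     return tags.get('shop') in ('pastry', 'bakery') or \
--         tags.get('amenity') in ('restaurant', 'cafe', 'fast_food', 'bakery',
--                                 'bar', 'nightclub', 'internet_cafe', 'pub')
-- ===== Notes on version B (the rewrite author's own statement) =====
-- stated objective: idiomatic
-- what changed: Replaces building a 10-pair list and scanning every tag for membership in it with two direct dict lookups (tags.get('shop') / tags.get('amenity')) tested against the two value sets; no per-tag scan.
import Mathlib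
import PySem

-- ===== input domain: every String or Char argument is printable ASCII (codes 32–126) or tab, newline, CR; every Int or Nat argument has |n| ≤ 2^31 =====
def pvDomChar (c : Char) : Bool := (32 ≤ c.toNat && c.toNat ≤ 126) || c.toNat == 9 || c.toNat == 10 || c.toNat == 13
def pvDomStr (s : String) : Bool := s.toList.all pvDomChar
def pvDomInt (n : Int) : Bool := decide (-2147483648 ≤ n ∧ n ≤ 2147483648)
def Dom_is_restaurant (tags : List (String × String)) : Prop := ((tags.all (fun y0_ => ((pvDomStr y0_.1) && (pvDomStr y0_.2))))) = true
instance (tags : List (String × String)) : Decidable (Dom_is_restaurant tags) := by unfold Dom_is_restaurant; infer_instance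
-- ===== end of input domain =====

-- B replaces A's scan of every tag against a 10-pair list by two direct dict lookups ('shop'/'amenity'); idiomatic, not faster.

-- ===== PORT A =====
def is_any_pair_present (tags : List (String × String)) (items : List (String × String)) : Bool :=
  -- isinstance(tags, dict) is always true under the type convention
  tags.any (fun kv => items.contains kv)

def is_restaurant (tags : List (String × String)) : Bool :=
  let items : List (String × String) :=
    [("shop", "pastry"), ("shop", "bakery")] ++
      (["restaurant", "cafe", "fast_food", "bakery",
        "bar", "nightclub", "internet_cafe", "pub"].map (fun v => ("amenity", v)))
  is_any_pair_present tags items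

-- ===== PORT B =====
-- Python "o in ('a', 'b')" where o is tags.get(...): None is in no tuple of strings
def optIn (o : Option String) (l : List String) : Bool :=
  match o with
  | some v => l.contains v
  | none => false

def is_restaurant_alt (tags : List (String × String)) : Bool :=
  let d := PySem.Dict.mk tags
  optIn (d.get? "shop") ["pastry", "bakery"] ||
    optIn (d.get? "amenity") ["restaurant", "cafe", "fast_food", "bakery",
                              "bar", "nightclub", "internet_cafe", "pub"]

-- ===== PRECONDITION & SPEC =====
-- Pre_ excludes association lists with duplicate keys: they do not represent a Python dict
-- (dict construction collapses duplicates last-wins), so A's behaviour there is representation-dependent.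
def Pre_is_restaurant (tags : List (String × String)) : Prop := (tags.map Prod.fst).Nodup
instance (tags : List (String × String)) : Decidable (Pre_is_restaurant tags) := by unfold Pre_is_restaurant; infer_instance

def pvWitness_is_restaurant : (List (String × String)) := [("amenity", "cafe"), ("name", "Joe")]

def Spec_is_restaurant (tags : List (String × String)) (out : Bool) : Prop := out = is_restaurant_alt tags
instance (tags : List (String × String)) (out : Bool) : Decidable (Spec_is_restaurant tags out) := by unfold Spec_is_restaurant; infer_instance

-- ===== CLAIM (what is proved, stated in full; the proofs are below) =====
def Claim_equal_is_restaurant : Prop := ∀ (tags : List (String × String)), Dom_is_restaurant tags → Pre_is_restaurant tags → Spec_is_restaurant tags (is_restaurant tags)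

-- ===== LEMMAS AND PROOFS =====

set_option maxRecDepth 4096 in
theorem main_equiv (tags : List (String × String)) (h : (tags.map Prod.fst).Nodup) :
    is_restaurant tags = is_restaurant_alt tags := by
  induction tags with
  | nil => rfl
  | cons kv rest ih =>
    obtain ⟨k, v⟩ := kv
    simp only [List.map_cons, List.nodup_cons, List.mem_map] at h
    obtain ⟨hk, hnd⟩ := h
    have ihr := ih hnd
    have hShop : k ∉ (rest.map Prod.fst) → (PySem.Dict.mk rest).get? k = none := by
      intro hm
      rw [PySem.Dict.get?_eq_none_iff_not_mem_keys]
      simpa using hm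
    simp only [is_restaurant, is_any_pair_present, is_restaurant_alt, List.any_cons,
      PySem.Dict.get?_mk_cons] at ihr ⊢
    by_cases hs : k = "shop"
    · subst hs
      have : (PySem.Dict.mk rest).get? "shop" = none := by
        apply hShop; intro hmem
        exact hk ⟨_, (List.mem_map.mp hmem).choose_spec⟩ |>.elim
      rw [ihr, this]
      simp [optIn]
    · by_cases ha : k = "amenity"
      · subst ha
        have : (PySem.Dict.mk rest).get? "amenity" = none := by
          apply hShop; intro hmem
          exact hk ⟨_, (List.mem_map.mp hmem).choose_spec⟩ |>.elim
        rw [ihr, this]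
        simp only [optIn, Bool.or_false]
        cases ({ items := rest } : PySem.Dict String String).get? "shop" with
        | none => simp
        | some w => simp [Bool.or_comm, Bool.or_assoc, Bool.or_left_comm]
      · rw [ihr]
        simp [optIn, hs, ha]

-- ===== VERDICT (by name: the statement is the Claim_ definition above) =====
theorem is_restaurant_spec : Claim_equal_is_restaurant := by
  intro tags _ hpre
  exact main_equiv tags hpre
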